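-- pv_equiv track=rewrite | github.com/hojin97/Prj_BioComputing_2021 | Project_PPI_Similarity.py | TraceAnnotation
-- ===== SOURCE A (Python) =====
-- def TraceAnnotation(AnnotationDict,AncesterDict):
--     ContentDict=dict()
--
--     for Term, Ancesters in AncesterDict.items():
--         GeneList=[k for k, v in AnnotationDict.items() if Term in v]
--         tempSet=set(GeneList.copy())
--         try:
--             ContentDict[Term].update(tempSet.copy()) # recording all genes as value which contains a Term{Term: [gene1,gene2,...]}
--             for Ancester in Ancesters:  # recording all genes with a term's all parents
--                 ContentDict[Ancester].update(tempSet.copy())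
--         except KeyError:
--             ContentDict[Term] = tempSet.copy()
--             for Ancester in Ancesters:
--                 try:
--                     ContentDict[Ancester].update(tempSet.copy())
--                 except KeyError:
--                     ContentDict[Ancester] = tempSet.copy()
--
--         GeneList.clear()
--         tempSet.clear()
--
--     return ContentDict
-- ===== SOURCE B (Python) =====
-- def TraceAnnotation(AnnotationDict, AncesterDict):
--     # Invert the annotation once: term -> list of genes annotated with it
--     # (in AnnotationDict order), so no rescan of AnnotationDict is needed
--     # per term of AncesterDict.
--     TermGenes = {}
--     for gene, terms in AnnotationDict.items():
--         for t in set(terms):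
--             TermGenes.setdefault(t, []).append(gene)
--     ContentDict = {}
--     for Term, Ancesters in AncesterDict.items():
--         genes = TermGenes.get(Term, [])
--         try:
--             # accumulate into the existing entries
--             ContentDict[Term].update(genes)
--             for a in Ancesters:
--                 ContentDict[a].update(genes)
--         except KeyError:
--             # some entry was missing: rebuild the term's entry and
--             # create missing ancestor entries
--             ContentDict[Term] = set(genes)
--             for a in Ancesters:
--                 ContentDict.setdefault(a, set()).update(genes)
--     return ContentDict
-- ===== Notes on version B (the rewrite author's own statement) =====
-- stated objective: faster
-- what changed: B builds an inverted index (term -> annotated genes) in one pass over AnnotationDict and looks each term's genes up in it, removing A's rescan of the whole AnnotationDict for every term of AncesterDict; the accumulate-or-rebuild-on-KeyError update policy is kept unchanged.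
import Mathlib
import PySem

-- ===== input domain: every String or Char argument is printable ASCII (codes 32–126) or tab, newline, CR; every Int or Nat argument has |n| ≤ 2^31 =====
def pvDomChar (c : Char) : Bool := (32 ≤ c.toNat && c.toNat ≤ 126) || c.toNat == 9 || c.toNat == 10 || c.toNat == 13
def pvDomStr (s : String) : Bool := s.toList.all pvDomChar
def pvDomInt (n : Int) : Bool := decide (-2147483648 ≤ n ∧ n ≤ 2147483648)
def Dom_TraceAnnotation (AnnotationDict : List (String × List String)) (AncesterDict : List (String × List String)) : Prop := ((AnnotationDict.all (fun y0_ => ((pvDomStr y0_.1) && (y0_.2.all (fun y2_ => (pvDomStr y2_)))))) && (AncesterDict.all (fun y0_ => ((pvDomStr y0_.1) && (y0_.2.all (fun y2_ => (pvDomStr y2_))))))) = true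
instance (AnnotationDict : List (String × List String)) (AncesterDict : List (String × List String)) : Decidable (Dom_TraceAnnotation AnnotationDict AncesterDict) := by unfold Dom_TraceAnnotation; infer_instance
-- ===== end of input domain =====

-- B replaces A's per-term rescan of AnnotationDict by an inverted index (term -> genes)
-- built in one pass; the update policy (accumulate, on KeyError rebuild) is unchanged.

-- ===== PORT A =====

-- GeneList = [k for k, v in AnnotationDict.items() if Term in v]
def pvGenes (ann : List (String × List String)) (Term : String) : List String :=
  (ann.filter (fun kv => kv.2.contains Term)).map (fun kv => kv.1)

-- the inner 'for Ancester in Ancesters: ContentDict[Ancester].update(...)' of the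
-- try block: stops with False at the first missing key (KeyError), partial updates kept
def pvAncTry (d : PySem.Dict String (PySem.Set String)) (ancs : List String)
    (g : List String) : PySem.Dict String (PySem.Set String) × Bool :=
  match ancs with
  | [] => (d, true)
  | a :: rest =>
    match d.get? a with
    | none => (d, false)
    | some s => pvAncTry (d.insert a (PySem.Set.update s g)) rest g

-- the whole try block; Bool = "no KeyError was raised"
def pvTryA (d : PySem.Dict String (PySem.Set String)) (T : String) (ancs : List String)
    (g : List String) : PySem.Dict String (PySem.Set String) × Bool :=
  match d.get? T with
  | none => (d, false)
  | some s => pvAncTry (d.insert T (PySem.Set.update s g)) ancs g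

-- inner try/except of A's except branch: update if present else create
def pvUpd (g : List String) (d : PySem.Dict String (PySem.Set String)) (a : String) :
    PySem.Dict String (PySem.Set String) :=
  match d.get? a with
  | some s => d.insert a (PySem.Set.update s g)
  | none => d.insert a (PySem.Set.ofList g)

-- one iteration of A's 'for Term, Ancesters in AncesterDict.items()'
def pvStepA (ann : List (String × List String)) (d : PySem.Dict String (PySem.Set String))
    (it : String × List String) : PySem.Dict String (PySem.Set String) :=
  let geneList := pvGenes ann it.1
  let tempSet : PySem.Set String := PySem.Set.ofList geneList
  match pvTryA d it.1 it.2 tempSet with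
  | (d', true) => d'
  | (d', false) =>
    let d1 := d'.insert it.1 tempSet
    it.2.foldl (pvUpd tempSet) d1

def TraceAnnotation (AnnotationDict : List (String × List String)) (AncesterDict : List (String × List String)) : List (String × List String) :=
  let ann := (PySem.Dict.ofList AnnotationDict).items
  let items := (PySem.Dict.ofList AncesterDict).items
  (items.foldl (pvStepA ann) PySem.Dict.empty).items

-- ===== PORT B =====

-- TermGenes: one pass over AnnotationDict; TermGenes.setdefault(t, []).append(gene)
def pvIndexB (ann : List (String × List String)) : PySem.Dict String (List String) :=
  ann.foldl
    (fun tg kv =>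
      (PySem.Set.ofList kv.2).foldl (fun tg t => tg.modify t [] (fun l => l ++ [kv.1])) tg)
    PySem.Dict.empty

-- one iteration of B's 'for Term, Ancesters in AncesterDict.items()'; the try block is
-- line for line A's try block, so it is ported by the same helper pvTryA, with the gene
-- LIST from the index; the except branch is ContentDict[Term] = set(genes) and then
-- ContentDict.setdefault(a, set()).update(genes) per ancestor (= modify)
def pvStepB (tg : PySem.Dict String (List String)) (d : PySem.Dict String (PySem.Set String))
    (it : String × List String) : PySem.Dict String (PySem.Set String) :=
  let genes := tg.getD it.1 []
  match pvTryA d it.1 it.2 genes with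
  | (d', true) => d'
  | (d', false) =>
    let d1 := d'.insert it.1 (PySem.Set.ofList genes)
    it.2.foldl (fun d a => d.modify a PySem.Set.empty (fun s => PySem.Set.update s genes)) d1

def TraceAnnotation_alt (AnnotationDict : List (String × List String)) (AncesterDict : List (String × List String)) : List (String × List String) :=
  let ann := (PySem.Dict.ofList AnnotationDict).items
  let tg := pvIndexB ann
  let items := (PySem.Dict.ofList AncesterDict).items
  (items.foldl (pvStepB tg) PySem.Dict.empty).items

-- ===== PRECONDITION & SPEC =====
def Spec_TraceAnnotation (AnnotationDict : List (String × List String)) (AncesterDict : List (String × List String)) (out : List (String × List String)) : Prop := out = TraceAnnotation_alt AnnotationDict AncesterDict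
instance (AnnotationDict : List (String × List String)) (AncesterDict : List (String × List String)) (out : List (String × List String)) : Decidable (Spec_TraceAnnotation AnnotationDict AncesterDict out) := by unfold Spec_TraceAnnotation; infer_instance

-- ===== CLAIM (what is proved, stated in full; the proofs are below) =====
def Claim_equal_TraceAnnotation : Prop := ∀ (AnnotationDict : List (String × List String)) (AncesterDict : List (String × List String)), Dom_TraceAnnotation AnnotationDict AncesterDict → Spec_TraceAnnotation AnnotationDict AncesterDict (TraceAnnotation AnnotationDict AncesterDict)

-- ===== LEMMAS AND PROOFS =====

-- the "update-or-create with gene list g" dict step both except loops reduce to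
def pvH (g : List String) (d : PySem.Dict String (PySem.Set String)) (a : String) :
    PySem.Dict String (PySem.Set String) :=
  d.insert a (PySem.Set.update (d.getD a []) g)

-- updating with set(g) is updating with g
lemma set_update_ofList {α : Type} [BEq α] [LawfulBEq α] (s : PySem.Set α) (g : List α) :
    PySem.Set.update s (PySem.Set.ofList g) = PySem.Set.update s g := by
  rw [PySem.Set.update_eq_append_filter, PySem.Set.update_eq_append_filter,
    PySem.Set.ofList_ofList]

-- A's update-or-create and B's modify are the same dict step
lemma pvUpd_eq_pvH (g : List String) (d : PySem.Dict String (PySem.Set String)) (a : String) :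
    pvUpd g d a = pvH g d a := by
  unfold pvUpd pvH
  cases hget : d.get? a with
  | some s =>
    simp only [hget, PySem.Dict.getD_eq_get?_getD, Option.getD_some]
  | none =>
    simp only [hget, PySem.Dict.getD_eq_get?_getD, Option.getD_none]
    rw [PySem.Set.update_nil_left]

lemma modify_eq_pvH (g : List String) (d : PySem.Dict String (PySem.Set String)) (a : String) :
    d.modify a PySem.Set.empty (fun s => PySem.Set.update s g) = pvH g d a := by
  rw [PySem.Dict.modify.eq_1, pvH]
  rfl

lemma pvH_ofList (g : List String) (d : PySem.Dict String (PySem.Set String)) (a : String) :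
    pvH (PySem.Set.ofList g) d a = pvH g d a := by
  unfold pvH
  rw [set_update_ofList]

lemma foldl_pvUpd_eq (g : List String) (l : List String)
    (d : PySem.Dict String (PySem.Set String)) :
    l.foldl (pvUpd g) d = l.foldl (pvH g) d :=
  PySem.List.foldl_congr_mem _ _ _ _ (fun acc a _ => pvUpd_eq_pvH g acc a)

lemma foldl_modify_eq (g : List String) (l : List String)
    (d : PySem.Dict String (PySem.Set String)) :
    l.foldl (fun d a => d.modify a PySem.Set.empty (fun s => PySem.Set.update s g)) d =
      l.foldl (pvH g) d :=
  PySem.List.foldl_congr_mem _ _ _ _ (fun acc a _ => modify_eq_pvH g acc a)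

-- the try block behaves the same on set(g) and on g
lemma ancTry_congr (g : List String) (l : List String) :
    ∀ (d : PySem.Dict String (PySem.Set String)),
    pvAncTry d l (PySem.Set.ofList g) = pvAncTry d l g := by
  induction l with
  | nil => intro d; rfl
  | cons a l ih =>
    intro d
    cases hget : d.get? a with
    | none => simp only [pvAncTry, hget]
    | some s => simp only [pvAncTry, hget, set_update_ofList, ih]

lemma tryA_congr (g : List String) (T : String) (l : List String)
    (d : PySem.Dict String (PySem.Set String)) :
    pvTryA d T l (PySem.Set.ofList g) = pvTryA d T l g := by
  cases hget : d.get? T with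
  | none => simp only [pvTryA, hget]
  | some s => simp only [pvTryA, hget, set_update_ofList, ancTry_congr]

-- A's step = B's step (given the index returns A's gene list)
lemma step_eq (ann : List (String × List String)) (tg : PySem.Dict String (List String))
    (htg : ∀ T, tg.getD T [] = pvGenes ann T)
    (d : PySem.Dict String (PySem.Set String)) (it : String × List String) :
    pvStepA ann d it = pvStepB tg d it := by
  simp only [pvStepA, pvStepB, htg it.1, tryA_congr]
  cases pvTryA d it.1 it.2 (pvGenes ann it.1) with
  | mk d' ok =>
    cases ok with
    | true => rfl
    | false =>
      simp only
      rw [foldl_pvUpd_eq, foldl_modify_eq]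
      exact PySem.List.foldl_congr_mem _ _ _ _ (fun acc a _ => pvH_ofList _ acc a)

-- the inverted index: TermGenes[T] is exactly A's GeneList for T ----------------

lemma index_inner (gene : String) (l : List String) (hl : l.Nodup) :
    ∀ (tg : PySem.Dict String (List String)) (T : String),
    (l.foldl (fun tg t => tg.modify t [] (fun xs => xs ++ [gene])) tg).getD T [] =
      tg.getD T [] ++ (if T ∈ l then [gene] else []) := by
  induction l with
  | nil => intro tg T; simp
  | cons a l ih =>
    intro tg T
    obtain ⟨hal, hnd⟩ := List.nodup_cons.mp hl
    simp only [List.foldl_cons]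
    rw [ih hnd]
    rw [PySem.Dict.modify.eq_1, PySem.Dict.getD_insert]
    by_cases hTa : T = a
    · subst hTa
      simp [hal]
    · simp [hTa]

lemma index_getD (ann : List (String × List String)) :
    ∀ (tg : PySem.Dict String (List String)) (T : String),
    (ann.foldl
      (fun tg kv =>
        (PySem.Set.ofList kv.2).foldl (fun tg t => tg.modify t [] (fun l => l ++ [kv.1])) tg)
      tg).getD T [] = tg.getD T [] ++ pvGenes ann T := by
  induction ann with
  | nil => intro tg T; simp [pvGenes]
  | cons kv ann ih =>
    intro tg T
    simp only [List.foldl_cons]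
    rw [ih]
    rw [index_inner kv.1 (PySem.Set.ofList kv.2) (PySem.Set.nodup_ofList kv.2)]
    unfold pvGenes
    rw [List.filter_cons]
    by_cases hmem : T ∈ kv.2
    · have : kv.2.contains T = true := List.elem_eq_true_of_mem hmem
      simp [this, PySem.Set.mem_ofList, hmem]
    · have : kv.2.contains T = false := by
        by_contra h
        exact hmem (List.mem_of_elem_eq_true (by simpa using h))
      simp [this, PySem.Set.mem_ofList, hmem]

lemma index_spec (ann : List (String × List String)) (T : String) :
    (pvIndexB ann).getD T [] = pvGenes ann T := by
  unfold pvIndexB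
  rw [index_getD]
  simp [PySem.Dict.getD_empty]

-- ===== VERDICT (by name: the statement is the Claim_ definition above) =====
theorem TraceAnnotation_spec : Claim_equal_TraceAnnotation := by
  intro AnnotationDict AncesterDict _
  unfold Spec_TraceAnnotation TraceAnnotation TraceAnnotation_alt
  exact congrArg PySem.Dict.items
    (PySem.List.foldl_congr_mem _ _ _ _
      (fun d it _ =>
        step_eq ((PySem.Dict.ofList AnnotationDict).items)
          (pvIndexB (PySem.Dict.ofList AnnotationDict).items)
          (fun T => index_spec _ T) d it))
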